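-- pv_equiv track=rewrite | github.com/Waqar-743/Research-Ai-Assistant | app/agents/report_generator.py | _insert_summary
-- ===== SOURCE A (Python) =====
-- def _insert_summary(markdown: str, summary: str) -> str:
--     """Insert executive summary after the title."""
--
--     lines = markdown.split('\n')
--
--     # Find where to insert (after title and metadata)
--     insert_index = 0
--     for i, line in enumerate(lines):
--         if line.startswith('---'):
--             insert_index = i + 1
--             break
--
--     summary_section = f"\n## Executive Summary\n\n{summary}\n"
--     lines.insert(insert_index, summary_section)
--
--     return '\n'.join(lines)
-- ===== SOURCE B (Python) =====
-- def _insert_summary(markdown: str, summary: str) -> str: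
--     """Insert executive summary after the title"""
--     section = f"\n## Executive Summary\n\n{summary}\n"
--     if not markdown.startswith('---') and '\n---' not in markdown:
--         # no '---' line at all: summary goes on top
--         return section + '\n' + markdown
--     # end offset of the first line that starts with '---'
--     if markdown.startswith('---'):
--         e = markdown.find('\n')
--     else:
--         e = markdown.find('\n', markdown.find('\n---') + 1)
--     if e == -1:
--         return markdown + '\n' + section
--     return markdown[:e] + '\n' + section + markdown[e:]
-- ===== Notes on version B (the rewrite author's own statement) =====
-- stated objective: alternative
-- what changed: Replaces split-into-lines + list.insert + '\n'.join by direct substring search (startswith / find of '\n---' / find of '\n') and slicing at character offsets, never materialising a line list.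
import Mathlib
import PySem

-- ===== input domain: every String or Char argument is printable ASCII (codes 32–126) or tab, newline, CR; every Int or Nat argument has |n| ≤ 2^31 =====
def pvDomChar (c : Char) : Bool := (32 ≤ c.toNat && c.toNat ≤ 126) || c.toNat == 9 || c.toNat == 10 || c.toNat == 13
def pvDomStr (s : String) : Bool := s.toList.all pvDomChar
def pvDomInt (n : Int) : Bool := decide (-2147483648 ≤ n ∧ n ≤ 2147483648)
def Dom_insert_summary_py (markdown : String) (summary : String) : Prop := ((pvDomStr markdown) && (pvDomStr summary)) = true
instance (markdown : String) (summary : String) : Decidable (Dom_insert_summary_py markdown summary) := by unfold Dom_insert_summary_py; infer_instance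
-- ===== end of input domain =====

-- B replaces A's split-into-lines / list.insert / '\n'.join by substring search and slicing at
-- character offsets; no line list is materialised.

-- ===== PORT A =====
-- the loop 'for i, line in enumerate(lines): if line.startswith('---'): insert_index = i + 1; break';
-- falls through to the initial value 0
def pvAInsertIdx : List (Int × List Char) → Int
  | [] => 0
  | (i, line) :: rest =>
    if PySem.Chars.startswith line "---".toList then i + 1 else pvAInsertIdx rest

def pvAChars (markdown : List Char) (summary : List Char) : List Char :=
  let lines := PySem.Chars.splitOn markdown "\n".toList
  let insertIndex := pvAInsertIdx (PySem.List.enumerate lines 0)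
  let summarySection := "\n## Executive Summary\n\n".toList ++ summary ++ "\n".toList
  PySem.Chars.join "\n".toList (PySem.List.insert lines insertIndex summarySection)

def insert_summary_py (markdown : String) (summary : String) : String :=
  String.ofList (pvAChars markdown.toList summary.toList)

-- ===== PORT B =====
def pvBChars (markdown : List Char) (summary : List Char) : List Char :=
  let sec := "\n## Executive Summary\n\n".toList ++ summary ++ "\n".toList
  if !(PySem.Chars.startswith markdown "---".toList)
      && !(PySem.Chars.isIn "\n---".toList markdown) then
    sec ++ "\n".toList ++ markdown
  else
    let e := if PySem.Chars.startswith markdown "---".toList then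
               PySem.Chars.find markdown "\n".toList
             else
               PySem.Chars.findFrom markdown "\n".toList
                 (PySem.Chars.find markdown "\n---".toList + 1) none
    if e = -1 then markdown ++ "\n".toList ++ sec
    else PySem.Chars.slice markdown none (some e) ++ "\n".toList ++ sec
           ++ PySem.Chars.slice markdown (some e) none

def insert_summary_py_alt (markdown : String) (summary : String) : String :=
  String.ofList (pvBChars markdown.toList summary.toList)

-- ===== PRECONDITION & SPEC =====
def Spec_insert_summary_py (markdown : String) (summary : String) (out : String) : Prop := out = insert_summary_py_alt markdown summary
instance (markdown : String) (summary : String) (out : String) : Decidable (Spec_insert_summary_py markdown summary out) := by unfold Spec_insert_summary_py; infer_instance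

-- ===== CLAIM (what is proved, stated in full; the proofs are below) =====
def Claim_equal_insert_summary_py : Prop := ∀ (markdown : String) (summary : String), Dom_insert_summary_py markdown summary → Spec_insert_summary_py markdown summary (insert_summary_py markdown summary)

-- ===== LEMMAS AND PROOFS =====

-- simple reference splitter: lsplit cur l = the lines of cur.reverse ++ l (cur = current line, reversed)
def lsplit : List Char → List Char → List (List Char)
  | cur, [] => [cur.reverse]
  | cur, c :: rest => if c = '\n' then cur.reverse :: lsplit [] rest else lsplit (c :: cur) rest

theorem go_eq (fuel : Nat) (l cur : List Char) (acc : List (List Char))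
    (h : l.length < fuel) :
    PySem.Chars.splitOn.go ['\n'] fuel l cur acc = acc.reverse ++ lsplit cur l := by
  induction fuel generalizing l cur acc with
  | zero => omega
  | succ n ih =>
    cases l with
    | nil => simp [PySem.Chars.splitOn.go, lsplit]
    | cons c rest =>
      by_cases hc : c = '\n'
      · subst hc
        rw [PySem.Chars.splitOn.go]
        simp [List.isPrefixOf, lsplit,
          ih rest [] (cur.reverse :: acc) (by simpa using Nat.lt_of_succ_lt_succ h)]
      · rw [PySem.Chars.splitOn.go]
        have hpf : List.isPrefixOf ['\n'] (c :: rest) = false := by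
          simp [List.isPrefixOf]; intro h'; exact hc h'.symm
        simp [hpf, lsplit, hc, ih rest (c :: cur) acc (by simpa using Nat.lt_of_succ_lt_succ h)]

theorem splitOn_eq (cs : List Char) : PySem.Chars.splitOn cs "\n".toList = lsplit [] cs := by
  simpa using go_eq (cs.length + 1) cs [] [] (by omega)

theorem lsplit_cons_exists (cur l : List Char) : ∃ a t, lsplit cur l = a :: t := by
  induction l generalizing cur with
  | nil => exact ⟨cur.reverse, [], rfl⟩
  | cons c rest ih =>
    by_cases hc : c = '\n'
    · subst hc; exact ⟨cur.reverse, lsplit [] rest, by simp [lsplit]⟩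
    · obtain ⟨a, t, h⟩ := ih (c :: cur)
      exact ⟨a, t, by simp [lsplit, hc, h]⟩

theorem join_lsplit (cur l : List Char) :
    PySem.Chars.join ['\n'] (lsplit cur l) = cur.reverse ++ l := by
  induction l generalizing cur with
  | nil => simp [lsplit, PySem.Chars.join_singleton]
  | cons c rest ih =>
    by_cases hc : c = '\n'
    · subst hc
      obtain ⟨a, t, h⟩ := lsplit_cons_exists [] rest
      simp only [lsplit, if_true, h, PySem.Chars.join_cons_cons]
      rw [← h, ih]
      simp
    · simp only [lsplit, if_neg hc, ih (c :: cur)]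
      simp

theorem lsplit_no_nl (cur l : List Char) (h : '\n' ∉ l) : lsplit cur l = [cur.reverse ++ l] := by
  induction l generalizing cur with
  | nil => simp [lsplit]
  | cons c rest ih =>
    have hc : c ≠ '\n' := by simp at h; tauto
    simp only [lsplit, if_neg hc, ih (c :: cur) (by simp at h; tauto)]
    simp

theorem lsplit_split (cur l1 rest : List Char) (h : '\n' ∉ l1) :
    lsplit cur (l1 ++ '\n' :: rest) = (cur.reverse ++ l1) :: lsplit [] rest := by
  induction l1 generalizing cur with
  | nil => simp [lsplit]
  | cons c l1' ih =>
    have hc : c ≠ '\n' := by simp at h; tauto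
    simp only [List.cons_append, lsplit, if_neg hc, ih (c :: cur) (by simp at h; tauto)]
    simp

theorem nl_decomp (md : List Char) :
    '\n' ∉ md ∨ ∃ l1 rest, md = l1 ++ '\n' :: rest ∧ '\n' ∉ l1 := by
  induction md with
  | nil => left; simp
  | cons c rest ih =>
    by_cases hc : c = '\n'
    · right; exact ⟨[], rest, by simp [hc], by simp⟩
    · rcases ih with h | ⟨l1, r, hr, hl⟩
      · left; simp [h]; exact fun hx => hc hx.symm
      · right; exact ⟨c :: l1, r, by simp [hr], by simp [hl]; exact fun hx => hc hx.symm⟩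

theorem single_prefix {a : Char} {l : List Char} : [a] <+: l ↔ ∃ t, l = a :: t := by
  constructor
  · rintro ⟨t, ht⟩; exact ⟨t, by simpa using ht.symm⟩
  · rintro ⟨t, rfl⟩; exact ⟨t, rfl⟩

theorem join_cons_ne (a : List Char) (Z : List (List Char)) (h : Z ≠ []) :
    PySem.Chars.join ['\n'] (a :: Z) = a ++ '\n' :: PySem.Chars.join ['\n'] Z := by
  cases Z with
  | nil => exact absurd rfl h
  | cons z Z' => simpa using PySem.Chars.join_cons_cons ['\n'] a z Z'

theorem startswith_false_iff (l p : List Char) :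
    PySem.Chars.startswith l p = false ↔ ¬ p <+: l := by
  rw [← PySem.Chars.startswith_iff]
  cases PySem.Chars.startswith l p <;> simp

theorem idx_all_false (ls : List (List Char)) (s : Int)
    (h : ∀ l ∈ ls, PySem.Chars.startswith l "---".toList = false) :
    pvAInsertIdx (PySem.List.enumerate ls s) = 0 := by
  induction ls generalizing s with
  | nil => simp [PySem.List.enumerate_nil, pvAInsertIdx]
  | cons l ls ih =>
    rw [PySem.List.enumerate_cons]
    simp only [pvAInsertIdx, h l (by simp), if_false, Bool.false_eq_true]
    exact ih (s + 1) (fun x hx => h x (by simp [hx]))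

theorem idx_shift (ls : List (List Char)) (s : Int)
    (h : ∃ l ∈ ls, PySem.Chars.startswith l "---".toList = true) :
    pvAInsertIdx (PySem.List.enumerate ls s) = s + pvAInsertIdx (PySem.List.enumerate ls 0) := by
  induction ls generalizing s with
  | nil => simp at h
  | cons l ls ih =>
    rw [PySem.List.enumerate_cons, PySem.List.enumerate_cons]
    by_cases hl : PySem.Chars.startswith l "---".toList = true
    · simp only [pvAInsertIdx, hl, if_true]
      ring
    · have hm : ∃ x ∈ ls, PySem.Chars.startswith x "---".toList = true := by
        rcases h with ⟨x, hx, hsx⟩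
        rcases List.mem_cons.mp hx with rfl | hx'
        · exact absurd hsx hl
        · exact ⟨x, hx', hsx⟩
      simp only [pvAInsertIdx, hl, if_false, Bool.false_eq_true]
      rw [ih (s + 1) hm, ih (0 + 1) hm]
      ring

theorem idx_bounds (ls : List (List Char))
    (h : ∃ l ∈ ls, PySem.Chars.startswith l "---".toList = true) :
    1 ≤ pvAInsertIdx (PySem.List.enumerate ls 0) ∧
      pvAInsertIdx (PySem.List.enumerate ls 0) ≤ ls.length := by
  induction ls with
  | nil => simp at h
  | cons l ls ih =>
    rw [PySem.List.enumerate_cons]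
    by_cases hl : PySem.Chars.startswith l "---".toList = true
    · simp only [pvAInsertIdx, hl, if_true, List.length_cons]
      constructor <;> omega
    · have hm : ∃ x ∈ ls, PySem.Chars.startswith x "---".toList = true := by
        rcases h with ⟨x, hx, hsx⟩
        rcases List.mem_cons.mp hx with rfl | hx'
        · exact absurd hsx hl
        · exact ⟨x, hx', hsx⟩
      simp only [pvAInsertIdx, hl, if_false, Bool.false_eq_true]
      rw [idx_shift ls (0 + 1) hm]
      have := ih hm
      simp only [List.length_cons]
      omega

theorem find_eq_of (s sub : List Char) (j : Nat) (h1 : sub <+: s.drop j)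
    (h2 : ∀ i, i < j → ¬ sub <+: s.drop i) : PySem.Chars.find s sub = (j : Int) := by
  have hinf : sub <:+: s := h1.isInfix.trans (List.drop_suffix j s).isInfix
  have hpos : 0 ≤ PySem.Chars.find s sub := (PySem.Chars.find_nonneg_iff s sub).mpr hinf
  obtain ⟨hp, hmin⟩ := PySem.Chars.find_spec hpos
  rcases Nat.lt_trichotomy (PySem.Chars.find s sub).toNat j with h | h | h
  · exact absurd hp (h2 _ h)
  · omega
  · exact absurd h1 (hmin j h)

theorem drop_into_l1 (l1 tail z : List Char) (i : Nat) (hi : i < l1.length)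
    (hn : '\n' ∉ l1) : ¬ ('\n' :: z) <+: (l1 ++ tail).drop i := by
  rw [List.drop_append_of_le_length (le_of_lt hi), List.drop_eq_getElem_cons hi]
  intro hpf
  rw [List.cons_append, List.cons_prefix_cons] at hpf
  exact hn (hpf.1 ▸ List.getElem_mem hi)

theorem find_nl (l1 rest : List Char) (h : '\n' ∉ l1) :
    PySem.Chars.find (l1 ++ '\n' :: rest) "\n".toList = (l1.length : Int) := by
  apply find_eq_of
  · rw [List.drop_left]
    exact single_prefix.mpr ⟨rest, rfl⟩
  · intro i hi
    exact drop_into_l1 l1 ('\n' :: rest) [] i hi h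

theorem find_nl_none (md : List Char) (h : '\n' ∉ md) :
    PySem.Chars.find md "\n".toList = -1 := by
  rw [PySem.Chars.find_eq_neg_one_iff]
  intro hinf
  exact h ((List.singleton_infix_iff '\n' md).mp hinf)

theorem no_nl_prefix : ∀ (sub l1 rest : List Char), '\n' ∉ sub → '\n' ∉ l1 →
    sub <+: l1 ++ '\n' :: rest → sub <+: l1
  | [], _, _, _, _, _ => List.nil_prefix
  | c :: sub', l1, rest, hs, hl, h => by
    have hc : c ≠ '\n' := by simp at hs; tauto
    cases l1 with
    | nil =>
      rw [List.nil_append, List.cons_prefix_cons] at h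
      exact absurd h.1 hc
    | cons d l1' =>
      rw [List.cons_append, List.cons_prefix_cons] at h
      rw [h.1, List.cons_prefix_cons]
      exact ⟨rfl, no_nl_prefix sub' l1' rest (by simp at hs; tauto) (by simp at hl; tauto) h.2⟩

theorem prefix_drop_length (s sub : List Char) (j : Nat) (hne : sub ≠ [])
    (h : sub <+: s.drop j) : j + sub.length ≤ s.length := by
  have h1 := h.length_le
  rw [List.length_drop] at h1
  have h2 : j < s.length := by
    by_contra hc
    rw [List.drop_eq_nil_of_le (by omega)] at h
    exact hne (List.prefix_nil.mp h)
  omega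

theorem drop_mid (l1 rest : List Char) (i : Nat) :
    (l1 ++ '\n' :: rest).drop (l1.length + 1 + i) = rest.drop i := by
  rw [show l1 ++ '\n' :: rest = (l1 ++ ['\n']) ++ rest by simp,
      show l1.length + 1 + i = (l1 ++ ['\n']).length + i by simp]
  exact List.drop_length_add_append i

theorem take_mid (l1 rest : List Char) (i : Nat) :
    (l1 ++ '\n' :: rest).take (l1.length + 1 + i) = l1 ++ '\n' :: rest.take i := by
  rw [show l1 ++ '\n' :: rest = (l1 ++ ['\n']) ++ rest by simp,
      show l1.length + 1 + i = (l1 ++ ['\n']).length + i by simp,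
      List.take_length_add_append]
  simp

theorem infix_of_prefix_drop (sub l : List Char) (i : Nat) (h : sub <+: l.drop i) :
    sub <:+: l := h.isInfix.trans (List.drop_suffix i l).isInfix

theorem infix_step (l1 rest : List Char) (hl : '\n' ∉ l1)
    (h : "\n---".toList <:+: l1 ++ '\n' :: rest) :
    "---".toList <+: rest ∨ "\n---".toList <:+: rest := by
  have hex : ∃ j, "\n---".toList <+: (l1 ++ '\n' :: rest).drop j := by
    rw [PySem.Chars.exists_prefix_drop_iff_isIn, PySem.Chars.isIn_iff_infix]
    exact h
  obtain ⟨j, hj⟩ := hex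
  rcases Nat.lt_trichotomy j l1.length with hlt | heq | hgt
  · exact absurd hj (drop_into_l1 l1 ('\n' :: rest) "---".toList j hlt hl)
  · subst heq
    rw [List.drop_left] at hj
    left
    have : ('\n' :: "---".toList) <+: ('\n' :: rest) := hj
    rw [List.cons_prefix_cons] at this
    exact this.2
  · right
    obtain ⟨i, rfl⟩ : ∃ i, j = l1.length + 1 + i := ⟨j - (l1.length + 1), by omega⟩
    rw [drop_mid] at hj
    exact infix_of_prefix_drop _ _ _ hj

theorem Lmatch : ∀ n (md : List Char), md.length ≤ n →
    ("---".toList <+: md ∨ "\n---".toList <:+: md) →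
    ∃ line ∈ lsplit [] md, PySem.Chars.startswith line "---".toList = true := by
  intro n
  induction n with
  | zero =>
    intro md hlen h
    exfalso
    rw [List.length_eq_zero_iff.mp (by omega : md.length = 0)] at h
    rcases h with h | h
    · simpa using h.length_le
    · simpa using h.length_le
  | succ n ih =>
    intro md hlen h
    rcases nl_decomp md with hno | ⟨l1, rest, rfl, hl1⟩
    · rcases h with h | h
      · refine ⟨md, by simp [lsplit_no_nl [] md hno], ?_⟩
        rw [PySem.Chars.startswith_iff]
        exact h
      · exfalso
        exact hno (h.mem (by simp))
    · rw [lsplit_split [] l1 rest hl1]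
      by_cases hd : "---".toList <+: l1
      · exact ⟨l1, by simp, (PySem.Chars.startswith_iff _ _).mpr hd⟩
      · have hrest : "---".toList <+: rest ∨ "\n---".toList <:+: rest := by
          rcases h with h | h
          · exact absurd (no_nl_prefix _ _ _ (by decide) hl1 h) hd
          · exact infix_step l1 rest hl1 h
        have hlen' : rest.length ≤ n := by
          have : (l1 ++ '\n' :: rest).length = l1.length + 1 + rest.length := by simp; omega
          omega
        obtain ⟨line, hmem, hsl⟩ := ih rest hlen' hrest
        exact ⟨line, by simp [hmem], hsl⟩

theorem Lfail : ∀ n (md : List Char), md.length ≤ n →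
    ¬ "---".toList <+: md → ¬ "\n---".toList <:+: md →
    ∀ line ∈ lsplit [] md, PySem.Chars.startswith line "---".toList = false := by
  intro n
  induction n with
  | zero =>
    intro md hlen h1 _ line hmem
    rw [List.length_eq_zero_iff.mp (by omega : md.length = 0)] at hmem h1
    simp [lsplit] at hmem
    subst hmem
    rw [startswith_false_iff]
    simpa using h1
  | succ n ih =>
    intro md hlen h1 h2 line hmem
    rcases nl_decomp md with hno | ⟨l1, rest, rfl, hl1⟩
    · rw [lsplit_no_nl [] md hno] at hmem
      simp at hmem
      subst hmem
      rw [startswith_false_iff]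
      exact h1
    · rw [lsplit_split [] l1 rest hl1] at hmem
      simp only [List.reverse_nil, List.nil_append, List.mem_cons] at hmem
      rcases hmem with heq | hmem
      · subst heq
        rw [startswith_false_iff]
        intro hc
        exact h1 (hc.trans (List.prefix_append _ _))
      · have hr1 : ¬ "---".toList <+: rest := by
          intro hc
          apply h2
          have : "\n---".toList <+: (l1 ++ '\n' :: rest).drop l1.length := by
            rw [List.drop_left]
            rw [show "\n---".toList = '\n' :: "---".toList from rfl, List.cons_prefix_cons]
            exact ⟨rfl, hc⟩
          exact infix_of_prefix_drop _ _ _ this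
        have hr2 : ¬ "\n---".toList <:+: rest := by
          intro hc
          have hsuf : rest <:+ l1 ++ '\n' :: rest :=
            (List.suffix_cons '\n' rest).trans (List.suffix_append _ _)
          exact h2 (hc.trans hsuf.isInfix)
        have hlen' : rest.length ≤ n := by
          have : (l1 ++ '\n' :: rest).length = l1.length + 1 + rest.length := by simp; omega
          omega
        exact ih rest hlen' hr1 hr2 line hmem

theorem insert_cons_shift (x S : List Char) (ls : List (List Char)) (k : Int)
    (h0 : 0 ≤ k) (h1 : k ≤ ls.length) :
    PySem.List.insert (x :: ls) (1 + k) S = x :: PySem.List.insert ls k S := by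
  obtain ⟨p, rfl⟩ : ∃ p : Nat, k = (p : Int) := ⟨k.toNat, by omega⟩
  have hp : p ≤ ls.length := by exact_mod_cast h1
  rw [show (1 : Int) + p = ((p + 1 : Nat) : Int) by push_cast; ring]
  rw [PySem.List.insert_natCast _ _ _ (by simpa using Nat.succ_le_succ hp),
      PySem.List.insert_natCast _ _ _ hp]
  simp


theorem find_nl3_head (l1 rest : List Char) (hl : '\n' ∉ l1) (hd : "---".toList <+: rest) :
    PySem.Chars.find (l1 ++ '\n' :: rest) "\n---".toList = (l1.length : Int) := by
  apply find_eq_of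
  · rw [List.drop_left, show ("\n---".toList : List Char) = '\n' :: "---".toList from rfl,
      List.cons_prefix_cons]
    exact ⟨rfl, hd⟩
  · intro i hi
    exact drop_into_l1 l1 _ "---".toList i hi hl

theorem find_nl3_shift (l1 rest : List Char) (hl : '\n' ∉ l1) (hd : ¬ "---".toList <+: rest)
    (hin : "\n---".toList <:+: rest) :
    PySem.Chars.find (l1 ++ '\n' :: rest) "\n---".toList
      = (l1.length : Int) + 1 + PySem.Chars.find rest "\n---".toList := by
  have hpos : 0 ≤ PySem.Chars.find rest "\n---".toList :=
    (PySem.Chars.find_nonneg_iff _ _).mpr hin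
  obtain ⟨hp, hmin⟩ := PySem.Chars.find_spec hpos
  have hkey : PySem.Chars.find (l1 ++ '\n' :: rest) "\n---".toList
      = ((l1.length + 1 + (PySem.Chars.find rest "\n---".toList).toNat : Nat) : Int) := by
    apply find_eq_of
    · rw [drop_mid]
      exact hp
    · intro i hi
      rcases Nat.lt_trichotomy i l1.length with h | h | h
      · exact drop_into_l1 l1 _ "---".toList i h hl
      · subst h
        rw [List.drop_left, show ("\n---".toList : List Char) = '\n' :: "---".toList from rfl,
          List.cons_prefix_cons]
        rintro ⟨-, hc⟩
        exact hd hc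
      · obtain ⟨i', rfl⟩ : ∃ i', i = l1.length + 1 + i' := ⟨i - (l1.length + 1), by omega⟩
        rw [drop_mid]
        exact hmin i' (by omega)
  obtain ⟨f, hf⟩ : ∃ f : Nat, PySem.Chars.find rest "\n---".toList = (f : Int) :=
    ⟨(PySem.Chars.find rest "\n---".toList).toNat, by omega⟩
  rw [hkey, hf]
  push_cast
  omega

-- f + len(sub) ≤ len(s) at the found position, for the "\n---" pattern
theorem find_nl3_bound (rest : List Char) (hin : "\n---".toList <:+: rest) :
    (PySem.Chars.find rest "\n---".toList).toNat + 4 ≤ rest.length := by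
  have hpos : 0 ≤ PySem.Chars.find rest "\n---".toList :=
    (PySem.Chars.find_nonneg_iff _ _).mpr hin
  obtain ⟨hp, -⟩ := PySem.Chars.find_spec hpos
  have := prefix_drop_length rest "\n---".toList _ (by decide) hp
  simpa using this

-- B on 'l1 ++ "\n" ++ rest' (first line not a '---' line, but one exists later) recurses into rest
theorem B_rec (l1 rest sm : List Char) (hl1 : '\n' ∉ l1)
    (hsw : ¬ "---".toList <+: (l1 ++ '\n' :: rest))
    (hin : "\n---".toList <:+: (l1 ++ '\n' :: rest)) :
    pvBChars (l1 ++ '\n' :: rest) sm = l1 ++ '\n' :: pvBChars rest sm := by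
  have hswb : PySem.Chars.startswith (l1 ++ '\n' :: rest) "---".toList = false :=
    (startswith_false_iff _ _).mpr hsw
  have hinb : PySem.Chars.isIn "\n---".toList (l1 ++ '\n' :: rest) = true :=
    (PySem.Chars.isIn_iff_infix _ _).mpr hin
  by_cases hdr : "---".toList <+: rest
  · -- the '---' line is the first line of rest
    have hfind : PySem.Chars.find (l1 ++ '\n' :: rest) "\n---".toList = (l1.length : Int) :=
      find_nl3_head l1 rest hl1 hdr
    have hdrb : PySem.Chars.startswith rest "---".toList = true :=
      (PySem.Chars.startswith_iff _ _).mpr hdr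
    have hff : PySem.Chars.findFrom (l1 ++ '\n' :: rest) "\n".toList ((l1.length : Int) + 1) none
        = if PySem.Chars.find rest "\n".toList = -1 then -1
          else ((l1.length : Int) + 1) + PySem.Chars.find rest "\n".toList := by
      rw [show (l1.length : Int) + 1 = ((l1.length + 1 : Nat) : Int) by push_cast; ring]
      rw [PySem.Chars.findFrom_natCast _ _ (l1.length + 1) (by simp)]
      rw [show (l1 ++ '\n' :: rest).drop (l1.length + 1) = rest by
        simpa using drop_mid l1 rest 0]
    by_cases hfr : PySem.Chars.find rest "\n".toList = -1
    · simp only [pvBChars, hswb, hinb, hdrb, hfind, hff, hfr, Bool.not_false, Bool.not_true,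
        Bool.false_and, Bool.and_false, Bool.false_eq_true, if_false, if_true]
      simp
    · have hfr0 : 0 ≤ PySem.Chars.find rest "\n".toList :=
        (PySem.Chars.find_nonneg_iff _ _).mpr ((PySem.Chars.find_ne_neg_one_iff _ _).mp hfr)
      obtain ⟨j, hj⟩ : ∃ j : Nat, PySem.Chars.find rest "\n".toList = (j : Int) :=
        ⟨(PySem.Chars.find rest "\n".toList).toNat, by omega⟩
      have hjlen : j ≤ rest.length := by
        have := PySem.Chars.find_le_length rest "\n".toList
        omega
      simp only [pvBChars, hswb, hinb, hdrb, hfind, hff, hj, Bool.not_false, Bool.not_true,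
        Bool.false_and, Bool.and_false, Bool.false_eq_true, if_false, if_true]
      rw [if_neg (by omega : ¬ ((j : Nat) : Int) = -1)]
      rw [show ((l1.length : Int) + 1) + (j : Int) = ((l1.length + 1 + j : Nat) : Int) by
        push_cast; ring]
      rw [if_neg (by omega : ¬ ((l1.length + 1 + j : Nat) : Int) = -1),
          if_neg (by omega : ¬ ((j : Nat) : Int) = -1)]
      rw [PySem.Chars.slice_eq_listSlice, PySem.Chars.slice_eq_listSlice,
          PySem.Chars.slice_eq_listSlice, PySem.Chars.slice_eq_listSlice]
      rw [PySem.List.slice_to _ (by omega), PySem.List.slice_from _ (by omega),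
          PySem.List.slice_to _ (by omega), PySem.List.slice_from _ (by omega)]
      rw [show ((l1.length + 1 + j : Nat) : Int).toNat = l1.length + 1 + j by omega,
          show ((j : Nat) : Int).toNat = j by omega]
      rw [take_mid, drop_mid]
      simp
  · -- the '---' line is deeper inside rest
    have hinr : "\n---".toList <:+: rest := (infix_step l1 rest hl1 hin).resolve_left hdr
    have hfind := find_nl3_shift l1 rest hl1 hdr hinr
    have hpos : 0 ≤ PySem.Chars.find rest "\n---".toList :=
      (PySem.Chars.find_nonneg_iff _ _).mpr hinr
    obtain ⟨f, hf⟩ : ∃ f : Nat, PySem.Chars.find rest "\n---".toList = (f : Int) :=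
      ⟨(PySem.Chars.find rest "\n---".toList).toNat, by omega⟩
    have hfb : f + 4 ≤ rest.length := by
      have := find_nl3_bound rest hinr
      omega
    have hdrb : PySem.Chars.startswith rest "---".toList = false :=
      (startswith_false_iff _ _).mpr hdr
    have hinrb : PySem.Chars.isIn "\n---".toList rest = true :=
      (PySem.Chars.isIn_iff_infix _ _).mpr hinr
    have hff : PySem.Chars.findFrom (l1 ++ '\n' :: rest) "\n".toList
        (PySem.Chars.find (l1 ++ '\n' :: rest) "\n---".toList + 1) none
        = if PySem.Chars.find (rest.drop (f + 1)) "\n".toList = -1 then -1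
          else ((l1.length + 1 + (f + 1) : Nat) : Int)
                 + PySem.Chars.find (rest.drop (f + 1)) "\n".toList := by
      rw [hfind, hf,
        show (l1.length : Int) + 1 + (f : Int) + 1 = ((l1.length + 1 + (f + 1) : Nat) : Int) by
          push_cast; ring]
      rw [PySem.Chars.findFrom_natCast _ _ (l1.length + 1 + (f + 1)) (by simp; omega)]
      rw [drop_mid]
    have hffr : PySem.Chars.findFrom rest "\n".toList
        (PySem.Chars.find rest "\n---".toList + 1) none
        = if PySem.Chars.find (rest.drop (f + 1)) "\n".toList = -1 then -1
          else ((f + 1 : Nat) : Int) + PySem.Chars.find (rest.drop (f + 1)) "\n".toList := by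
      rw [hf, show (f : Int) + 1 = ((f + 1 : Nat) : Int) by push_cast; ring]
      rw [PySem.Chars.findFrom_natCast _ _ (f + 1) (by omega)]
    by_cases hg : PySem.Chars.find (rest.drop (f + 1)) "\n".toList = -1
    · simp only [pvBChars, hswb, hinb, hdrb, hinrb, hff, hffr, hg, Bool.not_false, Bool.not_true,
        Bool.and_false, Bool.false_eq_true, if_false, if_true]
      simp
    · have hg0 : 0 ≤ PySem.Chars.find (rest.drop (f + 1)) "\n".toList :=
        (PySem.Chars.find_nonneg_iff _ _).mpr ((PySem.Chars.find_ne_neg_one_iff _ _).mp hg)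
      obtain ⟨g, hgv⟩ : ∃ g : Nat,
          PySem.Chars.find (rest.drop (f + 1)) "\n".toList = (g : Int) :=
        ⟨(PySem.Chars.find (rest.drop (f + 1)) "\n".toList).toNat, by omega⟩
      have hgb : g ≤ rest.length - (f + 1) := by
        have := PySem.Chars.find_le_length (rest.drop (f + 1)) "\n".toList
        rw [hgv] at this
        simp at this
        omega
      simp only [pvBChars, hswb, hinb, hdrb, hinrb, hff, hffr, hgv, Bool.not_false,
        Bool.not_true, Bool.and_false, Bool.false_eq_true, if_false]
      rw [if_neg (by omega : ¬ ((g : Nat) : Int) = -1)]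
      rw [show ((l1.length + 1 + (f + 1) : Nat) : Int) + (g : Int)
            = ((l1.length + 1 + (f + 1 + g) : Nat) : Int) by push_cast; ring,
          show ((f + 1 : Nat) : Int) + (g : Int) = ((f + 1 + g : Nat) : Int) by push_cast; ring]
      rw [if_neg (by omega : ¬ ((g : Nat) : Int) = -1)]
      rw [if_neg (by omega : ¬ ((l1.length + 1 + (f + 1 + g) : Nat) : Int) = -1),
          if_neg (by omega : ¬ ((f + 1 + g : Nat) : Int) = -1)]
      rw [PySem.Chars.slice_eq_listSlice, PySem.Chars.slice_eq_listSlice,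
          PySem.Chars.slice_eq_listSlice, PySem.Chars.slice_eq_listSlice]
      rw [PySem.List.slice_to _ (by omega), PySem.List.slice_from _ (by omega),
          PySem.List.slice_to _ (by omega), PySem.List.slice_from _ (by omega)]
      rw [show ((l1.length + 1 + (f + 1 + g) : Nat) : Int).toNat = l1.length + 1 + (f + 1 + g) by
            omega,
          show ((f + 1 + g : Nat) : Int).toNat = f + 1 + g by omega]
      rw [take_mid, drop_mid]
      simp

-- A on 'l1 ++ "\n" ++ rest' (first line not a '---' line, but one exists later) recurses into rest
theorem A_rec (l1 rest sm : List Char) (hl1 : '\n' ∉ l1)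
    (hswl1 : ¬ "---".toList <+: l1)
    (hmatch : ∃ line ∈ lsplit [] rest, PySem.Chars.startswith line "---".toList = true) :
    pvAChars (l1 ++ '\n' :: rest) sm = l1 ++ '\n' :: pvAChars rest sm := by
  have hnl : ("\n".toList : List Char) = ['\n'] := rfl
  have hswl1b : PySem.Chars.startswith l1 "---".toList = false :=
    (startswith_false_iff _ _).mpr hswl1
  have hk := idx_bounds (lsplit [] rest) hmatch
  simp only [pvAChars, splitOn_eq]
  simp only [hnl]
  rw [lsplit_split [] l1 rest hl1]
  simp only [List.reverse_nil, List.nil_append]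
  rw [PySem.List.enumerate_cons]
  simp only [pvAInsertIdx, hswl1b, if_false, Bool.false_eq_true]
  rw [idx_shift _ (0 + 1) hmatch,
    show (0 : Int) + 1 + pvAInsertIdx (PySem.List.enumerate (lsplit [] rest) 0)
        = 1 + pvAInsertIdx (PySem.List.enumerate (lsplit [] rest) 0) by ring]
  rw [insert_cons_shift _ _ _ _ (by omega) (by omega)]
  rw [join_cons_ne _ _ (by
    intro hc
    have := PySem.List.length_insert (lsplit [] rest)
      (pvAInsertIdx (PySem.List.enumerate (lsplit [] rest) 0))
      ("\n## Executive Summary\n\n".toList ++ sm ++ ['\n'])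
    rw [hc] at this
    simp at this)]

-- ===== main equivalence =====

theorem pv_main : ∀ n (md : List Char), md.length < n → ∀ sm, pvAChars md sm = pvBChars md sm := by
  intro n
  induction n with
  | zero => intro md h; exact absurd h (Nat.not_lt_zero _)
  | succ n ih =>
    intro md hlen sm
    have hnl : ("\n".toList : List Char) = ['\n'] := rfl
    by_cases hsw : PySem.Chars.startswith md "---".toList = true
    · -- the first line is a '---' line: insert right after it
      have hswp : "---".toList <+: md := (PySem.Chars.startswith_iff _ _).mp hsw
      rcases nl_decomp md with hno | ⟨l1, rest, rfl, hl1⟩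
      · -- single line: A appends at the end, B hits e = -1
        have hfindnl := find_nl_none md hno
        simp only [pvAChars, splitOn_eq]
        simp only [hnl]
        rw [lsplit_no_nl [] md hno]
        simp only [List.reverse_nil, List.nil_append]
        rw [PySem.List.enumerate_cons, PySem.List.enumerate_nil]
        simp only [pvAInsertIdx, hsw, if_true]
        rw [show (0 : Int) + 1 = ((1 : Nat) : Int) by norm_num]
        rw [PySem.List.insert_natCast _ 1 _ (by simp)]
        simp only [show List.take 1 [md] = [md] from rfl,
          show List.drop 1 [md] = ([] : List (List Char)) from rfl, List.singleton_append]
        rw [PySem.Chars.join_cons_cons, PySem.Chars.join_singleton]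
        simp only [pvBChars, hsw, hfindnl, Bool.not_true, Bool.false_and, Bool.false_eq_true,
          if_false, if_true]
        simp
      · -- first line l1 starts with '---'
        have hdl1 : "---".toList <+: l1 := no_nl_prefix _ _ _ (by decide) hl1 hswp
        have hdl1b : PySem.Chars.startswith l1 "---".toList = true :=
          (PySem.Chars.startswith_iff _ _).mpr hdl1
        have hfindnl := find_nl l1 rest hl1
        obtain ⟨a, t, hsp⟩ := lsplit_cons_exists ([] : List Char) rest
        -- A side
        simp only [pvAChars, splitOn_eq]
        simp only [hnl]
        rw [lsplit_split [] l1 rest hl1]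
        simp only [List.reverse_nil, List.nil_append]
        rw [PySem.List.enumerate_cons]
        simp only [pvAInsertIdx, hdl1b, if_true]
        rw [show (0 : Int) + 1 = ((1 : Nat) : Int) by norm_num]
        rw [hsp, PySem.List.insert_natCast _ 1 _ (by simp)]
        simp only [show ∀ (x y : List Char) (z : List (List Char)),
            List.take 1 (x :: y :: z) = [x] from fun _ _ _ => rfl,
          show ∀ (x y : List Char) (z : List (List Char)),
            List.drop 1 (x :: y :: z) = y :: z from fun _ _ _ => rfl, List.singleton_append]
        rw [PySem.Chars.join_cons_cons, PySem.Chars.join_cons_cons, ← hsp, join_lsplit]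
        -- B side
        simp only [pvBChars, hsw, hfindnl, Bool.not_true, Bool.false_and, Bool.false_eq_true,
          if_false, if_true]
        rw [if_neg (by omega : ¬ ((l1.length : Nat) : Int) = -1)]
        rw [PySem.Chars.slice_eq_listSlice, PySem.Chars.slice_eq_listSlice]
        rw [PySem.List.slice_to _ (by omega), PySem.List.slice_from _ (by omega)]
        rw [show ((l1.length : Nat) : Int).toNat = l1.length by omega]
        rw [List.take_left, List.drop_left]
        simp
    · have hswf : PySem.Chars.startswith md "---".toList = false := by
        cases h : PySem.Chars.startswith md "---".toList
        · rfl
        · exact absurd h hsw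
      have hswp : ¬ "---".toList <+: md := (startswith_false_iff _ _).mp hswf
      by_cases hin : PySem.Chars.isIn "\n---".toList md = true
      · -- a '---' line exists further down: both sides recurse into the tail
        have hinf : "\n---".toList <:+: md := (PySem.Chars.isIn_iff_infix _ _).mp hin
        rcases nl_decomp md with hno | ⟨l1, rest, rfl, hl1⟩
        · exact absurd (hinf.subset (by decide)) hno
        · have hswl1 : ¬ "---".toList <+: l1 := fun hc =>
            hswp (hc.trans (List.prefix_append _ _))
          have hstep := infix_step l1 rest hl1 hinf
          have hmatch := Lmatch rest.length rest le_rfl hstep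
          have hlen' : rest.length < n := by
            have : (l1 ++ '\n' :: rest).length = l1.length + 1 + rest.length := by
              simp
              omega
            omega
          rw [A_rec l1 rest sm hl1 hswl1 hmatch, B_rec l1 rest sm hl1 hswp hinf,
            ih rest hlen' sm]
      · -- no '---' line anywhere: both sides put the summary on top
        have hinf : ¬ "\n---".toList <:+: md := by
          rw [← PySem.Chars.isIn_iff_infix]
          exact hin
        have hinb : PySem.Chars.isIn "\n---".toList md = false := by
          cases h : PySem.Chars.isIn "\n---".toList md
          · rfl
          · exact absurd h hin
        have hall := Lfail md.length md le_rfl hswp hinf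
        obtain ⟨a, t, hsp⟩ := lsplit_cons_exists ([] : List Char) md
        simp only [pvAChars, splitOn_eq]
        simp only [hnl]
        rw [idx_all_false _ 0 hall, PySem.List.insert_zero]
        rw [join_cons_ne _ _ (by rw [hsp]; exact List.cons_ne_nil a t), join_lsplit]
        simp only [pvBChars, hswf, hinb, Bool.not_false, Bool.and_self, if_true]
        simp

-- ===== VERDICT (by name: the statement is the Claim_ definition above) =====
theorem insert_summary_py_spec : Claim_equal_insert_summary_py := by
  intro markdown summary _
  show _ = _
  simp [insert_summary_py, insert_summary_py_alt,
    pv_main (markdown.toList.length + 1) markdown.toList (Nat.lt_succ_self _)]
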